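-- pv_equiv track=rewrite | github.com/tehhuu/Atcoder | ABC/110/110-C.py | ad_list_gen
-- ===== SOURCE A (Python) =====
-- def ad_list_gen(S):
--     l = len(S)
--     ad_list = [[] for i in range(l)]
--     al_dict = {}
--
--     for i, moji in enumerate(S):
--         if moji not in al_dict:
--             al_dict[moji] = i
--         else:
--             ad_list[al_dict[moji]].append(i)
--
--     return ad_list
-- ===== SOURCE B (Python) =====
-- def ad_list_gen(S):
--     # group-first / distribute-second: full positions index, then one assignment per group
--     groups = {}
--     for i, c in enumerate(S):
--         groups.setdefault(c, []).append(i)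
--     ad_list = [[] for _ in range(len(S))]
--     for ps in groups.values():
--         ad_list[ps[0]] = ps[1:]
--     return ad_list
-- ===== Notes on version B (the rewrite author's own statement) =====
-- stated objective: alternative
-- what changed: A's single pass branches per character (record first index in a dict, else append to the target slot); B instead builds the complete char->all-positions grouping first, then distributes each group in a second pass: slot positions[0] receives positions[1:].
import Mathlib
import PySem

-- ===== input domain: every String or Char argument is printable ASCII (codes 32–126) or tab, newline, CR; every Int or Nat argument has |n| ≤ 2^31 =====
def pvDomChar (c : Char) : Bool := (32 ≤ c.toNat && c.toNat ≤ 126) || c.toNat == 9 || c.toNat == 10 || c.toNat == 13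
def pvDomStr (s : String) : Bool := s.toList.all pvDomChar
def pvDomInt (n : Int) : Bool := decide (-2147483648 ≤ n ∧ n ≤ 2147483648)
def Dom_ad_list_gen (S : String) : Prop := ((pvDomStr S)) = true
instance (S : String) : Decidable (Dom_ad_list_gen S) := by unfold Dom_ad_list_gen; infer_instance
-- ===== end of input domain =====

-- B builds the full char→positions grouping first and then distributes each group's tail
-- to the slot of its first position (alternative decomposition, same O(n) cost).

-- ===== PORT A =====
-- stored first-occurrence indices are enumerate indices, hence ≥ 0: `.toNat` is exact here
def ad_list_gen (S : String) : List (List Int) :=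
  let cs := S.toList
  let l := cs.length
  let ad_list : List (List Int) := (List.range l).map (fun _ => ([] : List Int))
  let res := (PySem.List.enumerate cs).foldl
    (fun (st : List (List Int) × PySem.Dict Char Int) (p : Int × Char) =>
      match st.2.get? p.2 with
      | none => (st.1, st.2.insert p.2 p.1)
      | some j => (st.1.modify j.toNat (· ++ [p.1]), st.2))
    (ad_list, PySem.Dict.empty)
  res.1

-- ===== PORT B =====
-- group positions are enumerate indices, hence ≥ 0: `.toNat` is exact; every group is
-- nonempty, so the `[]` branch of the match (where Python's ps[0] would raise) is unreachable
def ad_list_gen_alt (S : String) : List (List Int) :=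
  let cs := S.toList
  let groups := (PySem.List.enumerate cs).foldl
    (fun (d : PySem.Dict Char (List Int)) (p : Int × Char) => d.modify p.2 [] (· ++ [p.1]))
    PySem.Dict.empty
  let ad_list : List (List Int) := (List.range cs.length).map (fun _ => ([] : List Int))
  groups.values.foldl
    (fun (out : List (List Int)) (ps : List Int) =>
      match ps with
      | [] => out
      | h :: t => out.set h.toNat t)
    ad_list

-- ===== PRECONDITION & SPEC =====
def Spec_ad_list_gen (S : String) (out : List (List Int)) : Prop := out = ad_list_gen_alt S
instance (S : String) (out : List (List Int)) : Decidable (Spec_ad_list_gen S out) := by unfold Spec_ad_list_gen; infer_instance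

-- ===== CLAIM (what is proved, stated in full; the proofs are below) =====
def Claim_equal_ad_list_gen : Prop := ∀ (S : String), Dom_ad_list_gen S → Spec_ad_list_gen S (ad_list_gen S)

-- ===== LEMMAS AND PROOFS =====

-- proof-side names for the loop bodies of the two ports
def pvStepA (st : List (List Int) × PySem.Dict Char Int) (p : Int × Char) :
    List (List Int) × PySem.Dict Char Int :=
  match st.2.get? p.2 with
  | none => (st.1, st.2.insert p.2 p.1)
  | some j => (st.1.modify j.toNat (· ++ [p.1]), st.2)

def pvStepG (d : PySem.Dict Char (List Int)) (p : Int × Char) : PySem.Dict Char (List Int) :=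
  d.modify p.2 [] (· ++ [p.1])

def pvStepB (out : List (List Int)) (ps : List Int) : List (List Int) :=
  match ps with
  | [] => out
  | h :: t => out.set h.toNat t

def pvPass (out : List (List Int)) (vs : List (List Int)) : List (List Int) :=
  vs.foldl pvStepB out

def pvA (cs : List Char) : List (List Int) × PySem.Dict Char Int :=
  (PySem.List.enumerate cs).foldl pvStepA (List.replicate cs.length ([] : List Int), PySem.Dict.empty)

def pvG (cs : List Char) : PySem.Dict Char (List Int) :=
  (PySem.List.enumerate cs).foldl pvStepG PySem.Dict.empty

lemma pv_modify_append {α : Type} (l : List α) (x : α) (i : Nat) (f : α → α)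
    (h : i < l.length) : (l ++ [x]).modify i f = l.modify i f ++ [x] := by
  apply List.ext_getElem?
  intro j
  simp only [List.getElem?_modify, List.getElem?_append, List.length_modify]
  split_ifs <;> simp_all

lemma pv_set_modify_self {α : Type} (l : List α) (j : Nat) (t : α) (f : α → α) :
    (l.set j t).modify j f = l.set j (f t) := by
  apply List.ext_getElem?
  intro k
  by_cases hk : j = k
  · subst hk
    by_cases hlt : j < l.length
    · simp [hlt]
    · simp only [List.getElem?_modify]
      rw [List.getElem?_eq_none (by simpa using not_lt.mp hlt),
          List.getElem?_eq_none (by simpa using not_lt.mp hlt)]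
      rfl
  · simp [List.getElem?_set_ne hk, hk]

lemma pv_set_modify_comm {α : Type} (l : List α) (a j : Nat) (t : α) (f : α → α)
    (h : a ≠ j) : (l.set a t).modify j f = (l.modify j f).set a t := by
  apply List.ext_getElem?
  intro k
  by_cases hk : j = k
  · subst hk
    simp [List.getElem?_set_ne h]
  · by_cases hak : a = k
    · subst hak
      by_cases hlt : a < l.length
      · simp [hlt, hk]
      · simp only [List.getElem?_modify, List.getElem?_set, List.length_modify]
        simp [hk, hlt]
    · simp [List.getElem?_set_ne hak, hk]

lemma pv_key_unique {v v' : List Int} (its : List (Char × List Int)) (c : Char)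
    (hnd : (its.map (·.1)).Nodup) (h1 : (c, v) ∈ its) (h2 : (c, v') ∈ its) : v = v' := by
  induction its with
  | nil => cases h1
  | cons p its ih =>
    simp only [List.map_cons, List.nodup_cons] at hnd
    rcases List.mem_cons.mp h1 with rfl | m1
    · rcases List.mem_cons.mp h2 with e2 | m2
      · injection e2 with _ e; exact e.symm
      · exact absurd (List.mem_map.mpr ⟨(c, v'), m2, rfl⟩) hnd.1
    · rcases List.mem_cons.mp h2 with rfl | m2
      · exact absurd (List.mem_map.mpr ⟨(c, v), m1, rfl⟩) hnd.1
      · exact ih hnd.2 m1 m2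

lemma pvPass_append_singleton (out : List (List Int)) (vs : List (List Int)) (ps : List Int) :
    pvPass out (vs ++ [ps]) = pvStepB (pvPass out vs) ps := by
  simp [pvPass, List.foldl_append]

lemma pvPass_shift (vs : List (List Int)) (out : List (List Int)) (x : List Int)
    (hb : ∀ ps ∈ vs, ∀ h t, ps = h :: t → h.toNat < out.length) :
    pvPass (out ++ [x]) vs = pvPass out vs ++ [x] := by
  induction vs generalizing out with
  | nil => rfl
  | cons ps vs ih =>
    cases ps with
    | nil =>
      simp only [pvPass, List.foldl_cons, pvStepB]
      exact ih out (fun ps hm => hb ps (List.mem_cons_of_mem _ hm))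
    | cons h t =>
      have hlt : h.toNat < out.length := hb _ List.mem_cons_self h t rfl
      simp only [pvPass, List.foldl_cons, pvStepB]
      rw [List.set_append, if_pos hlt]
      have := ih (out.set h.toNat t) (by
        intro ps hm h' t' he
        simpa using hb ps (List.mem_cons_of_mem _ hm) h' t' he)
      simpa [pvPass] using this

lemma pvPass_comm_modify (vs : List (List Int)) (out : List (List Int)) (j : Nat)
    (f : List Int → List Int)
    (hb : ∀ ps ∈ vs, ∀ h t, ps = h :: t → h.toNat ≠ j) :
    pvPass (out.modify j f) vs = (pvPass out vs).modify j f := by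
  induction vs generalizing out with
  | nil => rfl
  | cons ps vs ih =>
    cases ps with
    | nil =>
      simp only [pvPass, List.foldl_cons, pvStepB]
      exact ih out (fun ps hm => hb ps (List.mem_cons_of_mem _ hm))
    | cons h t =>
      have hne : h.toNat ≠ j := hb _ List.mem_cons_self h t rfl
      simp only [pvPass, List.foldl_cons, pvStepB]
      rw [← pv_set_modify_comm _ _ _ _ _ hne]
      exact ih (out.set h.toNat t) (fun ps hm => hb ps (List.mem_cons_of_mem _ hm))

lemma pvPass_replace (its : List (Char × List Int)) (out : List (List Int))
    (c : Char) (h : Int) (t : List Int) (i : Int)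
    (hmem : (c, h :: t) ∈ its)
    (hkeys : (its.map (·.1)).Nodup)
    (hheads : its.Pairwise (fun a b => a.2.head? ≠ b.2.head?))
    (hpos : ∀ p ∈ its, ∀ x ∈ p.2, 0 ≤ x) :
    pvPass out ((its.map (fun p => if p.1 == c then (c, h :: t ++ [i]) else p)).map (·.2)) =
      (pvPass out (its.map (·.2))).modify h.toNat (· ++ [i]) := by
  induction its generalizing out with
  | nil => cases hmem
  | cons p its ih =>
    by_cases hpc : p.1 = c
    · -- p is the replaced entry; no later entry has key c, so the rest is untouched
      have hp : p = (c, h :: t) := by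
        rcases List.mem_cons.mp hmem with e | m
        · exact e.symm
        · exfalso
          simp only [List.map_cons, List.nodup_cons] at hkeys
          exact hkeys.1 (by rw [hpc]; exact List.mem_map.mpr ⟨_, m, rfl⟩)
      subst hp
      have hrest : its.map (fun p => if p.1 == c then (c, h :: t ++ [i]) else p) = its := by
        conv_rhs => rw [← List.map_id its]
        apply List.map_congr_left
        intro q hq
        have hqc : (q.1 == c) = false := beq_eq_false_iff_ne.mpr (by
          intro e
          simp only [List.map_cons, List.nodup_cons] at hkeys
          exact hkeys.1 (by rw [← e]; exact List.mem_map.mpr ⟨_, hq, rfl⟩))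
        simp [hqc]
      have hhd : (((c, h :: t) : Char × List Int).1 == c) = true := by simp
      simp only [List.map_cons, hhd, if_true, pvPass, List.foldl_cons, pvStepB, hrest]
      have hnot : ∀ ps ∈ its.map (·.2), ∀ h' t', ps = h' :: t' → h'.toNat ≠ h.toNat := by
        intro ps hm h' t' he hEq
        rcases List.mem_map.mp hm with ⟨q, hq, rfl⟩
        have hne := (List.pairwise_cons.mp hheads).1 q hq
        have h0 : (0:Int) ≤ h' :=
          hpos q (List.mem_cons_of_mem _ hq) h' (by rw [he]; exact List.mem_cons_self)
        have h0h : (0:Int) ≤ h := hpos _ List.mem_cons_self h List.mem_cons_self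
        have hh' : h' = h := by omega
        exact hne (by rw [he, hh']; rfl)
      show pvPass (out.set h.toNat (t ++ [i])) (its.map (·.2))
          = (pvPass (out.set h.toNat t) (its.map (·.2))).modify h.toNat (· ++ [i])
      rw [← pvPass_comm_modify _ _ _ _ hnot, pv_set_modify_self]
    · have hbe : (p.1 == c) = false := beq_eq_false_iff_ne.mpr hpc
      have hm' : (c, h :: t) ∈ its := by
        rcases List.mem_cons.mp hmem with e | m
        · exact absurd (congrArg Prod.fst e.symm) hpc
        · exact m
      simp only [List.map_cons, hbe, Bool.false_eq_true, if_false, pvPass, List.foldl_cons]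
      have := ih (pvStepB out p.2) hm'
        (by simp only [List.map_cons, List.nodup_cons] at hkeys; exact hkeys.2)
        ((List.pairwise_cons.mp hheads).2)
        (fun q hq => hpos q (List.mem_cons_of_mem _ hq))
      simpa [pvPass] using this

lemma pvFoldA_shift (es : List (Int × Char)) (ad : List (List Int))
    (d : PySem.Dict Char Int) (x : List Int)
    (hd : ∀ c h, d.get? c = some h → h.toNat < ad.length)
    (hes : ∀ p ∈ es, p.1.toNat < ad.length) :
    es.foldl pvStepA (ad ++ [x], d)
      = ((es.foldl pvStepA (ad, d)).1 ++ [x], (es.foldl pvStepA (ad, d)).2) := by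
  induction es generalizing ad d with
  | nil => rfl
  | cons p es ih =>
    obtain ⟨i, ch⟩ := p
    simp only [List.foldl_cons]
    cases hc : d.get? ch with
    | none =>
      have e1 : pvStepA (ad ++ [x], d) (i, ch) = (ad ++ [x], d.insert ch i) := by
        simp [pvStepA, hc]
      have e2 : pvStepA (ad, d) (i, ch) = (ad, d.insert ch i) := by
        simp [pvStepA, hc]
      rw [e1, e2]
      refine ih ad (d.insert ch i) ?_ (fun p hp => hes p (List.mem_cons_of_mem _ hp))
      intro c h hg
      by_cases hcc : c = ch
      · subst hcc
        rw [PySem.Dict.get?_insert_self] at hg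
        injection hg with e
        rw [← e]
        exact hes (i, c) List.mem_cons_self
      · rw [PySem.Dict.get?_insert_of_ne _ _ hcc] at hg
        exact hd c h hg
    | some j =>
      have hj : j.toNat < ad.length := hd ch j hc
      have e1 : pvStepA (ad ++ [x], d) (i, ch)
          = (ad.modify j.toNat (· ++ [i]) ++ [x], d) := by
        simp only [pvStepA, hc]
        rw [pv_modify_append _ _ _ _ hj]
      have e2 : pvStepA (ad, d) (i, ch) = (ad.modify j.toNat (· ++ [i]), d) := by
        simp [pvStepA, hc]
      rw [e1, e2]
      refine ih (ad.modify j.toNat (· ++ [i])) d ?_ ?_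
      · intro c h hg; simpa [List.length_modify] using hd c h hg
      · intro p hp; simpa [List.length_modify] using hes p (List.mem_cons_of_mem _ hp)

lemma pvG_keys_nodup (cs : List Char) : (pvG cs).keys.Nodup := by
  have := PySem.Dict.nodup_keys_foldl_modify_key (PySem.List.enumerate cs)
    (fun p : Int × Char => p.2) ([] : List Int) (fun _ p => (· ++ [p.1]))
    PySem.Dict.empty (by simp [PySem.Dict.keys_empty])
  exact this

lemma pv_enum_snoc (cs : List Char) (c : Char) :
    PySem.List.enumerate (cs ++ [c])
      = PySem.List.enumerate cs ++ [((cs.length : Int), c)] := by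
  simp [PySem.List.enumerate_append, PySem.List.enumerate_cons, PySem.List.enumerate_nil]

lemma pvMain (cs : List Char) :
    pvPass (List.replicate cs.length []) ((pvG cs).items.map (·.2)) = (pvA cs).1
    ∧ (pvA cs).1.length = cs.length
    ∧ (∀ c, (pvA cs).2.get? c = ((pvG cs).get? c).bind List.head?)
    ∧ (∀ p ∈ (pvG cs).items, p.2 ≠ [] ∧ ∀ x ∈ p.2, 0 ≤ x ∧ x.toNat < cs.length)
    ∧ ((pvG cs).items.map (fun p => p.2.head?)).Nodup := by
  induction cs using List.reverseRecOn with
  | nil =>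
    refine ⟨rfl, rfl, ?_, ?_, ?_⟩
    · intro c; simp [pvA, pvG, PySem.List.enumerate_nil, PySem.Dict.get?_empty]
    · intro p hp; simp [pvG, PySem.List.enumerate_nil, PySem.Dict.empty] at hp
    · simp [pvG, PySem.List.enumerate_nil, PySem.Dict.empty]
  | append_singleton cs c ih =>
    obtain ⟨h1, h2, h3, h5, h6⟩ := ih
    have hlen : (cs ++ [c]).length = cs.length + 1 := by simp
    have hes : ∀ p ∈ PySem.List.enumerate cs,
        p.1.toNat < (List.replicate cs.length ([] : List Int)).length := by
      intro p hp
      rcases (PySem.List.mem_enumerate_iff _ _ _).mp hp with ⟨k, hk, rfl⟩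
      simpa using hk
    have hshift : (PySem.List.enumerate cs).foldl pvStepA
        (List.replicate (cs.length + 1) ([] : List Int), PySem.Dict.empty)
        = ((pvA cs).1 ++ [[]], (pvA cs).2) := by
      rw [List.replicate_succ']
      exact pvFoldA_shift _ _ _ _ (by intro c' h hg; simp [PySem.Dict.get?_empty] at hg) hes
    have hA : pvA (cs ++ [c]) = pvStepA ((pvA cs).1 ++ [[]], (pvA cs).2) ((cs.length : Int), c) := by
      unfold pvA
      rw [pv_enum_snoc, List.foldl_append, hlen, hshift]
      rfl
    have hG : pvG (cs ++ [c]) = (pvG cs).insert c ((pvG cs).getD c [] ++ [(cs.length : Int)]) := by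
      unfold pvG
      rw [pv_enum_snoc, List.foldl_append]
      rfl
    have hPassShift : pvPass (List.replicate (cs.length + 1) []) ((pvG cs).items.map (·.2))
        = (pvA cs).1 ++ [[]] := by
      rw [List.replicate_succ']
      rw [pvPass_shift _ _ _ ?hb, h1]
      case hb =>
        intro ps hm h t he
        rcases List.mem_map.mp hm with ⟨q, hq, rfl⟩
        have := (h5 q hq).2 h (by rw [he]; exact List.mem_cons_self)
        simpa using this.2
    cases hc : (pvA cs).2.get? c with
    | none =>
      have hgc : (pvG cs).get? c = none := by
        cases hg : (pvG cs).get? c with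
        | none => rfl
        | some ps =>
          exfalso
          have hh := h3 c
          rw [hc, hg] at hh
          have hne := (h5 (c, ps) (PySem.Dict.mem_items_of_get?_eq_some _ hg)).1
          cases ps with
          | nil => exact hne rfl
          | cons a l => simp at hh
      have hcont : (pvG cs).contains c = false := by
        rw [PySem.Dict.contains_eq_isSome_get?, hgc]; rfl
      have hit : (pvG (cs ++ [c])).items
          = (pvG cs).items ++ [(c, [(cs.length : Int)])] := by
        rw [hG, PySem.Dict.getD_of_get?_eq_none _ _ hgc]
        have := PySem.Dict.items_insert_of_not_contains (pvG cs)
          ([] ++ [(cs.length : Int)]) hcont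
        simpa using this
      have hA' : pvA (cs ++ [c]) = ((pvA cs).1 ++ [[]], (pvA cs).2.insert c (cs.length : Int)) := by
        rw [hA]; simp [pvStepA, hc]
      refine ⟨?_, ?_, ?_, ?_, ?_⟩
      · rw [hA']
        dsimp only
        rw [hit, hlen]
        simp only [List.map_append, List.map_cons, List.map_nil]
        rw [pvPass_append_singleton, hPassShift]
        show pvStepB ((pvA cs).1 ++ [[]]) [(cs.length : Int)] = (pvA cs).1 ++ [[]]
        simp only [pvStepB, Int.toNat_natCast]
        rw [List.set_append, if_neg (by rw [h2]; omega), h2]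
        simp
      · rw [hA', hlen]
        dsimp only
        simp [h2]
      · intro c'
        rw [hA', hG, PySem.Dict.getD_of_get?_eq_none _ _ hgc]
        dsimp only
        by_cases hcc : c' = c
        · subst hcc
          rw [PySem.Dict.get?_insert_self, PySem.Dict.get?_insert_self]
          simp
        · rw [PySem.Dict.get?_insert_of_ne _ _ hcc, PySem.Dict.get?_insert_of_ne _ _ hcc]
          exact h3 c'
      · intro p hp
        rw [hit] at hp
        rcases List.mem_append.mp hp with hm | hm
        · obtain ⟨hne, hb⟩ := h5 p hm
          exact ⟨hne, fun x hx => ⟨(hb x hx).1, by have := (hb x hx).2; rw [hlen]; omega⟩⟩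
        · rcases List.mem_singleton.mp hm with rfl
          refine ⟨by simp, ?_⟩
          intro x hx
          have hx' : x = (cs.length : Int) := by simpa using hx
          subst hx'
          refine ⟨by positivity, ?_⟩
          rw [hlen]; simp
      · rw [hit]
        simp only [List.map_append, List.map_cons, List.map_nil]
        rw [List.nodup_append]
        refine ⟨h6, List.nodup_singleton _, ?_⟩
        intro a ha b hb
        rcases List.mem_singleton.mp hb with rfl
        rcases List.mem_map.mp ha with ⟨q, hq, rfl⟩
        obtain ⟨hne, hbd⟩ := h5 q hq
        cases hv : q.2 with
        | nil => exact absurd hv hne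
        | cons y l =>
          have hy := hbd y (by rw [hv]; exact List.mem_cons_self)
          simp only [List.head?_cons, ne_eq, Option.some.injEq]
          intro e
          rw [e] at hy
          simp at hy
    | some hidx =>
      have hgc : ∃ t, (pvG cs).get? c = some (hidx :: t) := by
        cases hg : (pvG cs).get? c with
        | none => exfalso; have hh := h3 c; rw [hc, hg] at hh; simp at hh
        | some ps =>
          have hh := h3 c
          rw [hc, hg] at hh
          cases ps with
          | nil => exact absurd ((h5 (c, []) (PySem.Dict.mem_items_of_get?_eq_some _ hg)).1) (by simp)
          | cons a l =>
            simp only [Option.bind_some, List.head?_cons, Option.some.injEq] at hh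
            exact ⟨l, by rw [hh]⟩
      obtain ⟨t, hg⟩ := hgc
      have hmem : (c, hidx :: t) ∈ (pvG cs).items := PySem.Dict.mem_items_of_get?_eq_some _ hg
      have hcont : (pvG cs).contains c = true := by
        rw [PySem.Dict.contains_eq_isSome_get?, hg]; rfl
      have hit : (pvG (cs ++ [c])).items
          = (pvG cs).items.map
              (fun p => if p.1 == c then (c, hidx :: t ++ [(cs.length : Int)]) else p) := by
        rw [hG, PySem.Dict.getD_of_get?_eq_some _ _ hg]
        exact PySem.Dict.items_insert_of_contains _ _ hcont
      have hA' : pvA (cs ++ [c])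
          = (((pvA cs).1 ++ [[]]).modify hidx.toNat (· ++ [(cs.length : Int)]), (pvA cs).2) := by
        rw [hA]; simp [pvStepA, hc]
      have hkeysnd : ((pvG cs).items.map (·.1)).Nodup := pvG_keys_nodup cs
      have hheads : (pvG cs).items.Pairwise (fun a b => a.2.head? ≠ b.2.head?) :=
        List.pairwise_map.mp h6
      have hpos : ∀ p ∈ (pvG cs).items, ∀ x ∈ p.2, 0 ≤ x :=
        fun p hp x hx => ((h5 p hp).2 x hx).1
      refine ⟨?_, ?_, ?_, ?_, ?_⟩
      · rw [hA']
        dsimp only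
        rw [hit, hlen]
        rw [pvPass_replace _ _ _ _ _ _ hmem hkeysnd hheads hpos, hPassShift]
      · rw [hA', hlen]
        dsimp only
        simp [List.length_modify, h2]
      · intro c'
        rw [hA', hG, PySem.Dict.getD_of_get?_eq_some _ _ hg]
        dsimp only
        by_cases hcc : c' = c
        · subst hcc
          rw [hc, PySem.Dict.get?_insert_self]
          simp
        · rw [PySem.Dict.get?_insert_of_ne _ _ hcc]
          exact h3 c'
      · intro p hp
        rw [hit] at hp
        rcases List.mem_map.mp hp with ⟨q, hq, rfl⟩
        by_cases hqc : q.1 = c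
        · have hqm : (c, q.2) ∈ (pvG cs).items := by rw [← hqc]; exact hq
          have hq2 : q.2 = hidx :: t := pv_key_unique _ c hkeysnd hqm hmem
          have hbq : (q.1 == c) = true := by simp [hqc]
          simp only [hbq, if_true]
          refine ⟨by simp, ?_⟩
          intro x hx
          simp only [List.cons_append, List.mem_cons, List.mem_append] at hx
          obtain ⟨hne, hbd⟩ := h5 (c, hidx :: t) hmem
          rcases hx with rfl | hx | rfl | hx0
          · have := hbd x List.mem_cons_self
            exact ⟨this.1, by rw [hlen]; omega⟩
          · have := hbd x (List.mem_cons_of_mem _ hx)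
            exact ⟨this.1, by rw [hlen]; omega⟩
          · refine ⟨by positivity, ?_⟩
            rw [hlen]; simp
          · cases hx0
        · have hbe : (q.1 == c) = false := beq_eq_false_iff_ne.mpr hqc
          simp only [hbe, Bool.false_eq_true, if_false]
          obtain ⟨hne, hbd⟩ := h5 q hq
          exact ⟨hne, fun x hx => ⟨(hbd x hx).1, by have := (hbd x hx).2; rw [hlen]; omega⟩⟩
      · rw [hit, List.map_map]
        have heq : ((pvG cs).items.map
            ((fun p : Char × List Int => p.2.head?) ∘
              (fun p => if p.1 == c then (c, hidx :: t ++ [(cs.length : Int)]) else p)))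
            = (pvG cs).items.map (fun p => p.2.head?) := by
          apply List.map_congr_left
          intro q hq
          by_cases hqc : q.1 = c
          · have hqm : (c, q.2) ∈ (pvG cs).items := by rw [← hqc]; exact hq
            have hq2 : q.2 = hidx :: t := pv_key_unique _ c hkeysnd hqm hmem
            have hbq : (q.1 == c) = true := by simp [hqc]
            simp [Function.comp, hbq, hq2]
          · have hbe : (q.1 == c) = false := beq_eq_false_iff_ne.mpr hqc
            simp [Function.comp, hbe]
        rw [heq]
        exact h6

-- ===== VERDICT (by name: the statement is the Claim_ definition above) =====
theorem ad_list_gen_spec : Claim_equal_ad_list_gen := by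
  intro S _
  show ad_list_gen S = ad_list_gen_alt S
  have eA : ad_list_gen S = (pvA S.toList).1 := by
    simp only [ad_list_gen, List.map_const', List.length_range]
    rfl
  have eB : ad_list_gen_alt S
      = pvPass (List.replicate S.toList.length []) ((pvG S.toList).items.map (·.2)) := by
    simp only [ad_list_gen_alt, List.map_const', List.length_range]
    rfl
  rw [eA, eB]
  exact ((pvMain S.toList).1).symm
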